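-- pv_equiv track=rewrite | github.com/js110/SA-HDPCA | scripts/make_tables.py | bold_best
-- ===== SOURCE A (Python) =====
-- from typing import List
--
-- def bold_best(values: List[str], best_idx: int) -> List[str]:
--     out = []
--     for i, v in enumerate(values):
--         if i == best_idx and v != "--":
--             out.append(f"\\textbf{{{v}}}")
--         else:
--             out.append(v)
--     return out
-- ===== SOURCE B (Python) =====
-- from typing import List
--
-- def bold_best(values: List[str], best_idx: int) -> List[str]:
--     # Splice: no scan, no per-element branch — prefix + bolded cell + suffix.
--     if not (0 <= best_idx < len(values)) or values[best_idx] == "--":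
--         return values[:]
--     return values[:best_idx] + [f"\\textbf{{{values[best_idx]}}}"] + values[best_idx + 1:]
-- ===== Notes on version B (the rewrite author's own statement) =====
-- stated objective: alternative
-- what changed: B builds the result by list splicing (prefix slice ++ single bolded cell ++ suffix slice) after checking the one candidate index, instead of A's enumerate scan with a per-element branch.
import Mathlib
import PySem

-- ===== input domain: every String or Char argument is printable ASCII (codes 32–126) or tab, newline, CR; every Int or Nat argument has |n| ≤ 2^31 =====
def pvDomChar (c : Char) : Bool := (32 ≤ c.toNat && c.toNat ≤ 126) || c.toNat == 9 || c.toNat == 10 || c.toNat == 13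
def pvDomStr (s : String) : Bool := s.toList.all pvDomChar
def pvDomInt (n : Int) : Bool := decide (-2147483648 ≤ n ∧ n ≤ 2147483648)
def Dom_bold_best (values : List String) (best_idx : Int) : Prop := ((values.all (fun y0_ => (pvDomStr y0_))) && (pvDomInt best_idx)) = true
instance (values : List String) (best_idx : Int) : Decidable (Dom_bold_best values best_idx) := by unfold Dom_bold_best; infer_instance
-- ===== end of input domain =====

-- B splices the result (prefix slice ++ bolded cell ++ suffix slice) after checking the one
-- candidate index, instead of A's enumerate scan; objective: alternative. Both are total.

-- ===== PORT A =====
-- literal port of A: enumerate and append element by element, bolding at the matching index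
def bold_best (values : List String) (best_idx : Int) : List String :=
  (PySem.List.enumerate values).foldl
    (fun out iv =>
      out ++ [if iv.1 = best_idx ∧ iv.2 ≠ "--" then "\\textbf{" ++ iv.2 ++ "}" else iv.2])
    []

-- ===== PORT B =====
-- literal port of B: guard the single candidate index, then splice prefix ++ cell ++ suffix;
-- values[best_idx] is read via pyGet? (exact: the guard ensures 0 ≤ best_idx < len)
def bold_best_alt (values : List String) (best_idx : Int) : List String :=
  if ¬ (0 ≤ best_idx ∧ best_idx < values.length) ∨
      (PySem.List.pyGet? values best_idx).getD "" = "--" then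
    PySem.List.slice values none none
  else
    PySem.List.slice values none (some best_idx)
      ++ ["\\textbf{" ++ (PySem.List.pyGet? values best_idx).getD "" ++ "}"]
      ++ PySem.List.slice values (some (best_idx + 1)) none

-- ===== PRECONDITION & SPEC =====
def Spec_bold_best (values : List String) (best_idx : Int) (out : List String) : Prop := out = bold_best_alt values best_idx
instance (values : List String) (best_idx : Int) (out : List String) : Decidable (Spec_bold_best values best_idx out) := by unfold Spec_bold_best; infer_instance

-- ===== CLAIM (what is proved, stated in full; the proofs are below) =====
def Claim_equal_bold_best : Prop := ∀ (values : List String) (best_idx : Int), Dom_bold_best values best_idx → Spec_bold_best values best_idx (bold_best values best_idx)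

-- ===== LEMMAS AND PROOFS =====

theorem foldl_app_map {α β : Type} (g : α → β) :
    ∀ (l : List α) (acc : List β),
      l.foldl (fun out x => out ++ [g x]) acc = acc ++ l.map g := by
  intro l
  induction l with
  | nil => simp
  | cons x xs ih => intro acc; simp [List.foldl, ih]

theorem enumerate_map_set :
    ∀ (xs : List String) (s b : Int),
      (PySem.List.enumerate xs s).map
        (fun iv => if iv.1 = b ∧ iv.2 ≠ "--" then "\\textbf{" ++ iv.2 ++ "}" else iv.2)
      = (if s ≤ b ∧ b < s + xs.length ∧ xs.getD (b - s).toNat "" ≠ "--" then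
          xs.set (b - s).toNat ("\\textbf{" ++ xs.getD (b - s).toNat "" ++ "}")
        else xs) := by
  intro xs
  induction xs with
  | nil =>
    intro s b
    rw [if_neg (fun h => by have h1 := h.1; have h2 := h.2.1; simp at h2; omega)]
    simp [PySem.List.enumerate_nil]
  | cons x xs ih =>
    intro s b
    simp only [PySem.List.enumerate_cons, List.map_cons]
    rw [ih (s + 1) b]
    by_cases hsb : s = b
    · subst hsb
      have h0 : (s - s).toNat = 0 := by omega
      have h1 : ¬ (s + 1 ≤ s ∧ s < s + 1 + (xs.length : Int) ∧ xs.getD (s - (s + 1)).toNat "" ≠ "--") :=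
        fun h => absurd h.1 (by omega)
      rw [if_neg h1]
      by_cases hx : x = "--"
      · have h2 : ¬ ((s : Int) = s ∧ x ≠ "--") := fun h => h.2 hx
        have h3 : ¬ (s ≤ s ∧ s < s + ((x :: xs).length : Int) ∧ (x :: xs).getD (s - s).toNat "" ≠ "--") :=
          fun h => h.2.2 (by rw [h0]; simpa using hx)
        rw [if_neg h2, if_neg h3]
      · rw [if_pos ⟨rfl, hx⟩,
            if_pos (⟨le_refl s, by simp, by rw [h0]; simpa using hx⟩ :
              s ≤ s ∧ s < s + ((x :: xs).length : Int) ∧ (x :: xs).getD (s - s).toNat "" ≠ "--"), h0]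
        simp
    · have hhd : ¬ (s = b ∧ x ≠ "--") := fun h => hsb h.1
      rw [if_neg hhd]
      by_cases hlt : s + 1 ≤ b
      · have ht : (b - s).toNat = (b - (s + 1)).toNat + 1 := by omega
        have hgd : (x :: xs).getD (b - s).toNat "" = xs.getD (b - (s + 1)).toNat "" := by
          rw [ht]; rfl
        by_cases hc : s + 1 ≤ b ∧ b < s + 1 + (xs.length : Int) ∧ xs.getD (b - (s + 1)).toNat "" ≠ "--"
        · rw [if_pos hc,
              if_pos (⟨by omega, by simp; omega, by rw [hgd]; exact hc.2.2⟩ :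
                s ≤ b ∧ b < s + ((x :: xs).length : Int) ∧ (x :: xs).getD (b - s).toNat "" ≠ "--"), ht]
          simp
        · rw [if_neg hc, if_neg]
          intro h
          exact hc ⟨by omega, by have := h.2.1; simp at this; omega, by rw [← hgd]; exact h.2.2⟩
      · have h1 : ¬ (s + 1 ≤ b ∧ b < s + 1 + (xs.length : Int) ∧ xs.getD (b - (s + 1)).toNat "" ≠ "--") :=
          fun h => absurd h.1 (by omega)
        have h2 : ¬ (s ≤ b ∧ b < s + ((x :: xs).length : Int) ∧ (x :: xs).getD (b - s).toNat "" ≠ "--") :=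
          fun h => hsb (by omega)
        rw [if_neg h1, if_neg h2]

-- the set-characterisation of A's scan equals B's splice
theorem set_eq_splice (values : List String) (b : Int) :
    (if (0:Int) ≤ b ∧ b < 0 + values.length ∧ values.getD (b - 0).toNat "" ≠ "--" then
      values.set (b - 0).toNat ("\\textbf{" ++ values.getD (b - 0).toNat "" ++ "}")
    else values) = bold_best_alt values b := by
  unfold bold_best_alt
  by_cases h : (0:Int) ≤ b ∧ b < 0 + values.length ∧ values.getD (b - 0).toNat "" ≠ "--"
  · obtain ⟨h0, hlt, hne⟩ := h
    have hlt' : b.toNat < values.length := by omega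
    have hget : PySem.List.pyGet? values b = values[b.toNat]? :=
      PySem.List.pyGet?_of_nonneg _ h0
    have hgd : values.getD (b - 0).toNat "" = (PySem.List.pyGet? values b).getD "" := by
      simp [hget, List.getD, sub_zero]
    rw [if_pos ⟨h0, hlt, hne⟩, if_neg (by
      intro hcon
      rcases hcon with h' | h'
      · exact h' ⟨h0, by simpa using hlt⟩
      · exact hne (hgd.trans h'))]
    rw [show PySem.List.slice values none (some b) = values.take b.toNat from
          PySem.List.slice_to _ h0,
        show PySem.List.slice values (some (b + 1)) none = values.drop (b + 1).toNat from
          PySem.List.slice_from _ (by omega)]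
    have hb1 : (b + 1).toNat = b.toNat + 1 := by omega
    rw [hb1, sub_zero, ← hgd, List.set_eq_take_append_cons_drop, if_pos hlt']
    simp
  · rw [if_neg h, if_pos, PySem.List.slice_none_none]
    by_cases hr : (0:Int) ≤ b ∧ b < values.length
    · right
      have hne := fun hx => h ⟨hr.1, by simpa using hr.2, hx⟩
      have hget : PySem.List.pyGet? values b = values[b.toNat]? :=
        PySem.List.pyGet?_of_nonneg _ hr.1
      have hgd : values.getD (b - 0).toNat "" = (PySem.List.pyGet? values b).getD "" := by
        simp [hget, List.getD, sub_zero]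
      exact hgd.symm.trans (not_not.mp hne)
    · left; simpa using hr

-- ===== VERDICT (by name: the statement is the Claim_ definition above) =====
theorem bold_best_spec : Claim_equal_bold_best := by
  intro values best_idx _
  unfold Spec_bold_best bold_best
  rw [foldl_app_map, List.nil_append, enumerate_map_set, set_eq_splice]
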